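-- pv_equiv track=rewrite | github.com/Jualschefsky/IDS-detector-de-intrusos-dark-mode | rules.py | detect_suspicious_activity
-- ===== SOURCE A (Python) =====
-- def detect_suspicious_activity(logs):
--     alerts = []
--
--     for i, line in enumerate(logs):
--         # Detecta 5 falhas de login em sequência
--         if "falha_login" in line:
--             count = sum(1 for l in logs[i:i+5] if "falha_login" in l)
--             if count >= 5:
--                 alerts.append(f"[ALERTA] Múltiplas falhas de login na linha {i}.")
--
--         # Detecta acessos restritos às 23h
--         if "acesso_restrito" in line and "hora=23" in line:
--             alerts.append(f"[ALERTA] Acesso restrito fora do horário - linha {i}.")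
--
--     return alerts
-- ===== SOURCE B (Python) =====
-- def detect_suspicious_activity(logs):
--     # Prefix-count table: P[k] = number of lines among logs[:k] containing "falha_login".
--     P = [0]
--     for line in logs:
--         P.append(P[-1] + (1 if "falha_login" in line else 0))
--     n = len(logs)
--     alerts = []
--     for i, line in enumerate(logs):
--         if "falha_login" in line and P[min(i + 5, n)] - P[i] >= 5:
--             alerts.append(f"[ALERTA] Múltiplas falhas de login na linha {i}.")
--         if "acesso_restrito" in line and "hora=23" in line:
--             alerts.append(f"[ALERTA] Acesso restrito fora do horário - linha {i}.")
--     return alerts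
-- ===== Notes on version B (the rewrite author's own statement) =====
-- stated objective: alternative
-- what changed: Replaces the per-line re-scan of each 5-line window (inner sum over logs[i:i+5]) with a prefix-count table built in a separate first pass, so the window count is obtained by a table-difference lookup.
import Mathlib
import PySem

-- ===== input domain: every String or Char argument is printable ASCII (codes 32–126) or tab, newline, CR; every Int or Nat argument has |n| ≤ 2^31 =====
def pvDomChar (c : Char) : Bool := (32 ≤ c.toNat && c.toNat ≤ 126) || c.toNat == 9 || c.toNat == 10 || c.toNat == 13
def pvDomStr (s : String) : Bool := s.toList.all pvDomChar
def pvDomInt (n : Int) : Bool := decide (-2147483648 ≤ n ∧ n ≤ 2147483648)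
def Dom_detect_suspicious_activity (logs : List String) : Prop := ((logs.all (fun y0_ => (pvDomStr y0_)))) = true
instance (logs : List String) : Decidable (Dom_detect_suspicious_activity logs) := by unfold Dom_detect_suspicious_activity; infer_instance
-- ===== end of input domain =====

-- B computes each 5-line window count from a prefix-count table built in a first
-- pass, instead of A's inner re-scan of logs[i:i+5]; same alerts in the same order.


-- ===== PORT A =====
def detect_suspicious_activity (logs : List String) : List String :=
  (PySem.List.enumerate logs 0).foldl
    (fun alerts p =>
      let alerts1 :=
        if PySem.Str.isIn "falha_login" p.2 then
          let count : Int :=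
            (PySem.List.slice logs (some p.1) (some (p.1 + 5))).foldl
              (fun s l => if PySem.Str.isIn "falha_login" l then s + 1 else s) 0
          if count ≥ 5 then
            alerts ++ ["[ALERTA] Múltiplas falhas de login na linha " ++ PySem.Int.toStr p.1 ++ "."]
          else alerts
        else alerts
      if PySem.Str.isIn "acesso_restrito" p.2 && PySem.Str.isIn "hora=23" p.2 then
        alerts1 ++ ["[ALERTA] Acesso restrito fora do horário - linha " ++ PySem.Int.toStr p.1 ++ "."]
      else alerts1)
    []

-- ===== PORT B =====
-- B-side helper: the loop 'for line in logs: P.append(P[-1] + …)' as structural recursion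
-- carrying the running count (exact: same prefix values in the same order).
def prefixFails : List String → Int → List Int
  | [], _ => []
  | l :: ls, acc =>
      let acc' := acc + (if PySem.Str.isIn "falha_login" l then 1 else 0)
      acc' :: prefixFails ls acc'

def detect_suspicious_activity_alt (logs : List String) : List String :=
  let P : List Int := 0 :: prefixFails logs 0
  let n := logs.length
  (PySem.List.enumerate logs 0).foldl
    (fun alerts p =>
      let alerts1 :=
        if PySem.Str.isIn "falha_login" p.2 &&
            decide (P.getD (min (p.1.toNat + 5) n) 0 - P.getD p.1.toNat 0 ≥ 5) then
          alerts ++ ["[ALERTA] Múltiplas falhas de login na linha " ++ PySem.Int.toStr p.1 ++ "."]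
        else alerts
      if PySem.Str.isIn "acesso_restrito" p.2 && PySem.Str.isIn "hora=23" p.2 then
        alerts1 ++ ["[ALERTA] Acesso restrito fora do horário - linha " ++ PySem.Int.toStr p.1 ++ "."]
      else alerts1)
    []

-- ===== PRECONDITION & SPEC =====
def Spec_detect_suspicious_activity (logs : List String) (out : List String) : Prop := out = detect_suspicious_activity_alt logs
instance (logs : List String) (out : List String) : Decidable (Spec_detect_suspicious_activity logs out) := by unfold Spec_detect_suspicious_activity; infer_instance

-- ===== CLAIM (what is proved, stated in full; the proofs are below) =====
def Claim_equal_detect_suspicious_activity : Prop := ∀ (logs : List String), Dom_detect_suspicious_activity logs → Spec_detect_suspicious_activity logs (detect_suspicious_activity logs)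

-- ===== LEMMAS AND PROOFS =====

def pFal : String → Bool := fun l => PySem.Str.isIn "falha_login" l

def msgFal (i : Int) : String := "[ALERTA] Múltiplas falhas de login na linha " ++ PySem.Int.toStr i ++ "."
def msgAcc (i : Int) : String := "[ALERTA] Acesso restrito fora do horário - linha " ++ PySem.Int.toStr i ++ "."

def gA (logs : List String) (p : Int × String) : List String :=
  (if pFal p.2 then
    (if ((PySem.List.slice logs (some p.1) (some (p.1 + 5))).foldl
          (fun s l => if PySem.Str.isIn "falha_login" l then s + 1 else s) 0 : Int) ≥ 5
     then [msgFal p.1] else [])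
   else []) ++
  (if PySem.Str.isIn "acesso_restrito" p.2 && PySem.Str.isIn "hora=23" p.2 then [msgAcc p.1] else [])

def gB (logs : List String) (p : Int × String) : List String :=
  (if pFal p.2 &&
      decide ((0 :: prefixFails logs 0).getD (min (p.1.toNat + 5) logs.length) 0
              - (0 :: prefixFails logs 0).getD p.1.toNat 0 ≥ 5) then [msgFal p.1] else []) ++
  (if PySem.Str.isIn "acesso_restrito" p.2 && PySem.Str.isIn "hora=23" p.2 then [msgAcc p.1] else [])

theorem foldl_body_eq {α : Type} (l : List α) (f : List String → α → List String)
    (g : α → List String) (h : ∀ acc x, f acc x = acc ++ g x) (acc : List String) :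
    l.foldl f acc = acc ++ l.flatMap g := by
  induction l generalizing acc with
  | nil => simp
  | cons x xs ih => rw [List.foldl_cons, h, ih, List.flatMap_cons, List.append_assoc]

theorem A_eq_flatMap (logs : List String) :
    detect_suspicious_activity logs = (PySem.List.enumerate logs 0).flatMap (gA logs) := by
  unfold detect_suspicious_activity
  refine (foldl_body_eq _ _ (gA logs) ?_ []).trans (by simp)
  intro acc p
  simp only [gA, pFal, msgFal, msgAcc]
  split_ifs <;> simp

theorem B_eq_flatMap (logs : List String) :
    detect_suspicious_activity_alt logs = (PySem.List.enumerate logs 0).flatMap (gB logs) := by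
  unfold detect_suspicious_activity_alt
  refine (foldl_body_eq _ _ (gB logs) ?_ []).trans (by simp)
  intro acc p
  simp only [gB, pFal, msgFal, msgAcc]
  split_ifs <;> simp

theorem prefixFails_getD (logs : List String) (a : Int) (j : Nat) (hj : j < logs.length) :
    (prefixFails logs a).getD j 0 = a + ((logs.take (j + 1)).countP pFal : Int) := by
  induction logs generalizing a j with
  | nil => simp at hj
  | cons l ls ih =>
    cases j with
    | zero =>
      cases h : PySem.Str.isIn "falha_login" l <;>
        simp [prefixFails, pFal, List.countP_cons]
    | succ j =>
      have hj' : j < ls.length := by simpa using hj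
      simp only [prefixFails, List.getD_cons_succ, List.take_succ_cons, List.countP_cons]
      rw [ih _ j hj']
      simp only [pFal]
      split_ifs <;> push_cast <;> ring

theorem P_getD (logs : List String) (j : Nat) (hj : j ≤ logs.length) :
    (0 :: prefixFails logs 0).getD j 0 = ((logs.take j).countP pFal : Int) := by
  cases j with
  | zero => simp
  | succ j =>
    have hj' : j < logs.length := by omega
    simp only [List.getD_cons_succ]
    rw [prefixFails_getD logs 0 j hj']
    simp

theorem window_count (logs : List String) (k : Nat) (hk : k < logs.length) :
    (0 :: prefixFails logs 0).getD (min (k + 5) logs.length) 0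
      - (0 :: prefixFails logs 0).getD k 0
      = (((logs.drop k).take 5).countP pFal : Int) := by
  rw [P_getD logs (min (k + 5) logs.length) (by omega), P_getD logs k (by omega)]
  have htake : logs.take (min (k + 5) logs.length) = logs.take (k + 5) := by
    rcases le_total (k + 5) logs.length with h | h
    · rw [min_eq_left h]
    · rw [min_eq_right h, List.take_of_length_le h, List.take_of_length_le (le_refl _)]
  rw [htake, List.take_add, List.countP_append]
  push_cast; ring

theorem g_eq (logs : List String) (p : Int × String) (hp : p ∈ PySem.List.enumerate logs 0) :
    gA logs p = gB logs p := by
  rw [PySem.List.mem_enumerate_iff] at hp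
  obtain ⟨k, hk, rfl⟩ := hp
  unfold gA gB
  simp only [zero_add]
  congr 1
  rw [PySem.List.foldl_if_add_one]
  have hslice : PySem.List.slice logs (some (k : Int)) (some ((k : Int) + 5)) = (logs.drop k).take 5 := by
    have : ((k : Int) + 5) = ((k + 5 : Nat) : Int) := by push_cast; ring
    rw [this, PySem.List.slice_natCast]
    congr 1; omega
  rw [hslice]
  have hnat : ((k : Int)).toNat = k := by omega
  rw [hnat, window_count logs k hk]
  have hcp : List.countP pFal ((logs.drop k).take 5)
      = List.countP (PySem.Str.isIn "falha_login") ((logs.drop k).take 5) := rfl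
  rw [hcp]
  cases h1 : PySem.Str.isIn "falha_login" logs[k] <;>
    simp only [pFal, h1, Bool.false_and, Bool.true_and, if_false, Bool.false_eq_true, zero_add]
  split_ifs with h2 h3 <;> first
    | rfl
    | (exfalso; simp only [decide_eq_true_eq] at *; omega)

-- ===== VERDICT (by name: the statement is the Claim_ definition above) =====
theorem detect_suspicious_activity_spec : Claim_equal_detect_suspicious_activity := by
  intro logs _
  unfold Spec_detect_suspicious_activity
  rw [A_eq_flatMap, B_eq_flatMap]
  unfold List.flatMap
  congr 1
  exact List.map_congr_left (fun p hp => g_eq logs p hp)
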